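-- pv_equiv track=rewrite | github.com/RobBhandari/WorkAgents | execution/dashboards/security_content_builder.py | _build_category_counts
-- ===== SOURCE A (Python) =====
-- def _build_category_counts(active_buckets: frozenset, bucket_counts_by_product: dict) -> dict:
--     """Compute per-category totals for the filter bar, limited to active buckets."""
--     category_counts: dict[str, int] = {}
--     if "CODE" in active_buckets:
--         category_counts["code"] = sum(
--             counts.get("CODE", {}).get("total", 0) for counts in bucket_counts_by_product.values()
--         )
--     if "CLOUD" in active_buckets:
--         category_counts["cloud"] = sum(
--             counts.get("CLOUD", {}).get("total", 0) for counts in bucket_counts_by_product.values()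
--         )
--     if "INFRASTRUCTURE" in active_buckets:
--         category_counts["infrastructure"] = sum(
--             counts.get("INFRASTRUCTURE", {}).get("total", 0) for counts in bucket_counts_by_product.values()
--         )
--     return category_counts
-- ===== SOURCE B (Python) =====
-- def _build_category_counts(active_buckets: frozenset, bucket_counts_by_product: dict) -> dict:
--     """Single pass over the products, accumulating all three bucket totals at once."""
--     code = cloud = infra = 0
--     for counts in bucket_counts_by_product.values():
--         code += counts.get("CODE", {}).get("total", 0)
--         cloud += counts.get("CLOUD", {}).get("total", 0)
--         infra += counts.get("INFRASTRUCTURE", {}).get("total", 0)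
--     result: dict[str, int] = {}
--     if "CODE" in active_buckets:
--         result["code"] = code
--     if "CLOUD" in active_buckets:
--         result["cloud"] = cloud
--     if "INFRASTRUCTURE" in active_buckets:
--         result["infrastructure"] = infra
--     return result
-- ===== Notes on version B (the rewrite author's own statement) =====
-- stated objective: alternative
-- what changed: Replaces A's three separate generator-sum scans over bucket_counts_by_product (one per category) with a single pass that accumulates the three totals simultaneously, then assembles the result dict for the active buckets.
import Mathlib
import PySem

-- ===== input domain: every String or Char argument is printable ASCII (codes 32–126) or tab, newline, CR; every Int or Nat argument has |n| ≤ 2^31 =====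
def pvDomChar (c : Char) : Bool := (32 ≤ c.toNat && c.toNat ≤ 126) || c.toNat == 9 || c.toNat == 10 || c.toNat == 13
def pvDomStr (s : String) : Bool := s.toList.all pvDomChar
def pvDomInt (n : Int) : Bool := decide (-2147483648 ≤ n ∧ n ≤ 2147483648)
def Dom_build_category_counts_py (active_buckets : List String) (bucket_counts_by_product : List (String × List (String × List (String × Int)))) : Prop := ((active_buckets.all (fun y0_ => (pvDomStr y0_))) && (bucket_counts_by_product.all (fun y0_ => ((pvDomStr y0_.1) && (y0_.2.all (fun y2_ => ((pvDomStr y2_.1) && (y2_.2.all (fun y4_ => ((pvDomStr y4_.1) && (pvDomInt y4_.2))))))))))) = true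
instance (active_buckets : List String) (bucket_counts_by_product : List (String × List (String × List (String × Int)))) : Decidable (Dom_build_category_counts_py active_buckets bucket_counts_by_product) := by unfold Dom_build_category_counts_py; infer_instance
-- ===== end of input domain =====

-- B replaces A's three per-category scans with one pass accumulating all three totals; alternative decomposition, same cost class.
-- ===== PORT A =====
-- counts.get(bk, {}).get("total", 0)
def pvTot (counts : List (String × List (String × Int))) (bk : String) : Int :=
  PySem.Dict.getD (PySem.Dict.mk (PySem.Dict.getD (PySem.Dict.mk counts) bk [])) "total" 0

-- sum(counts.get(bk, {}).get("total", 0) for counts in bucket_counts_by_product.values())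
def pvSumA (bk : String) (bucket_counts_by_product : List (String × List (String × List (String × Int)))) : Int :=
  (PySem.Dict.values (PySem.Dict.mk bucket_counts_by_product)).foldl (fun acc counts => acc + pvTot counts bk) 0

def build_category_counts_py (active_buckets : List String) (bucket_counts_by_product : List (String × List (String × List (String × Int)))) : List (String × Int) :=
  let category_counts : PySem.Dict String Int := PySem.Dict.empty
  let category_counts := if "CODE" ∈ active_buckets then
      PySem.Dict.insert category_counts "code" (pvSumA "CODE" bucket_counts_by_product)
    else category_counts
  let category_counts := if "CLOUD" ∈ active_buckets then
      PySem.Dict.insert category_counts "cloud" (pvSumA "CLOUD" bucket_counts_by_product)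
    else category_counts
  let category_counts := if "INFRASTRUCTURE" ∈ active_buckets then
      PySem.Dict.insert category_counts "infrastructure" (pvSumA "INFRASTRUCTURE" bucket_counts_by_product)
    else category_counts
  category_counts.items

-- ===== PORT B =====
def build_category_counts_py_alt (active_buckets : List String) (bucket_counts_by_product : List (String × List (String × List (String × Int)))) : List (String × Int) :=
  -- one pass: (code, cloud, infra) accumulator over the products
  let t : Int × Int × Int := (PySem.Dict.values (PySem.Dict.mk bucket_counts_by_product)).foldl
    (fun acc counts => (acc.1 + pvTot counts "CODE", acc.2.1 + pvTot counts "CLOUD", acc.2.2 + pvTot counts "INFRASTRUCTURE"))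
    (0, 0, 0)
  let result : PySem.Dict String Int := PySem.Dict.empty
  let result := if "CODE" ∈ active_buckets then PySem.Dict.insert result "code" t.1 else result
  let result := if "CLOUD" ∈ active_buckets then PySem.Dict.insert result "cloud" t.2.1 else result
  let result := if "INFRASTRUCTURE" ∈ active_buckets then PySem.Dict.insert result "infrastructure" t.2.2 else result
  result.items

-- ===== PRECONDITION & SPEC =====
def Spec_build_category_counts_py (active_buckets : List String) (bucket_counts_by_product : List (String × List (String × List (String × Int)))) (out : List (String × Int)) : Prop := out = build_category_counts_py_alt active_buckets bucket_counts_by_product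
instance (active_buckets : List String) (bucket_counts_by_product : List (String × List (String × List (String × Int)))) (out : List (String × Int)) : Decidable (Spec_build_category_counts_py active_buckets bucket_counts_by_product out) := by unfold Spec_build_category_counts_py; infer_instance

-- ===== CLAIM (what is proved, stated in full; the proofs are below) =====
def Claim_equal_build_category_counts_py : Prop := ∀ (active_buckets : List String) (bucket_counts_by_product : List (String × List (String × List (String × Int)))), Dom_build_category_counts_py active_buckets bucket_counts_by_product → Spec_build_category_counts_py active_buckets bucket_counts_by_product (build_category_counts_py active_buckets bucket_counts_by_product)

-- ===== LEMMAS AND PROOFS =====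
-- The single-pass triple fold computes, component-wise, exactly A's three separate sums.
theorem pvTriple_fold (l : List (List (String × List (String × Int)))) :
    ∀ (a b c : Int),
      l.foldl (fun (acc : Int × Int × Int) counts =>
          (acc.1 + pvTot counts "CODE", acc.2.1 + pvTot counts "CLOUD", acc.2.2 + pvTot counts "INFRASTRUCTURE")) (a, b, c)
        = (a + l.foldl (fun acc counts => acc + pvTot counts "CODE") 0,
           b + l.foldl (fun acc counts => acc + pvTot counts "CLOUD") 0,
           c + l.foldl (fun acc counts => acc + pvTot counts "INFRASTRUCTURE") 0) := by
  induction l with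
  | nil => intro a b c; simp
  | cons h tl ih =>
      intro a b c
      simp only [List.foldl_cons, ih, PySem.List.foldl_add]
      simp only [Prod.mk.injEq]
      refine ⟨by ring, by ring, by ring⟩

-- ===== VERDICT (by name: the statement is the Claim_ definition above) =====
theorem build_category_counts_py_spec : Claim_equal_build_category_counts_py := by
  intro active_buckets bucket_counts_by_product _
  unfold Spec_build_category_counts_py build_category_counts_py build_category_counts_py_alt pvSumA
  simp only [pvTriple_fold, zero_add]
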